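-- pv_equiv track=rewrite | github.com/tac0x2a/nonogram-solver-py | solv.py | find_avairable_patterns_sub
-- ===== SOURCE A (Python) =====
-- def find_avairable_patterns_sub(max_depth, least_l, least_area, result, results, d = 1):
--     if d >= max_depth:
--         if len(least_area[0]) < ( sum(least_l) + len(least_l) - 1 ):
--             return results
--         result.append(least_l)
--         results.append(result)
--         return results
--
--     for i in range(len(least_l)+1):
--         tmp_res = list(result)
--         tmp_res.append(least_l[0:i])
--         ls = least_l[i:]
--
--         if len(least_area[0]) < ( sum(least_l[0:i]) + len(least_l[0:i]) - 1 ):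
--             break
--
--         find_avairable_patterns_sub(max_depth, ls, least_area[1:], tmp_res, results, d+1)
--
--     return results
-- ===== SOURCE B (Python) =====
-- # Level-synchronous (BFS) re-implementation: expand all partial partitions one area
-- # at a time instead of recursing; equivalence is about the RETURN value (A also
-- # mutates `result`/`results` in place; B only appends the new partitions to `results`).
-- def find_avairable_patterns_sub(max_depth, least_l, least_area, result, results, d = 1):
--     levels = max_depth - d if max_depth > d else 0
--     area = least_area
--     states = [(least_l, result)]
--     for _ in range(levels):
--         area_len = len(area[0])
--         new_states = []
--         for ls, res in states:
--             for i in range(len(ls) + 1):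
--                 chunk = ls[0:i]
--                 if area_len < sum(chunk) + len(chunk) - 1:
--                     break
--                 new_states.append((ls[i:], res + [chunk]))
--         states = new_states
--         area = area[1:]
--     final_len = len(area[0])
--     for ls, res in states:
--         if final_len >= sum(ls) + len(ls) - 1:
--             results.append(res + [ls])
--     return results
-- ===== Notes on version B (the rewrite author's own statement) =====
-- stated objective: alternative
-- what changed: Replaces the depth-first recursion (one recursive call per prefix split) by a level-synchronous expansion: a worklist of partial partitions is expanded one area at a time in a loop, then all surviving states are checked and appended at once; equivalence is about the return value (both also append to `results` in place, A additionally mutates `result` in its base case).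
import Mathlib
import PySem

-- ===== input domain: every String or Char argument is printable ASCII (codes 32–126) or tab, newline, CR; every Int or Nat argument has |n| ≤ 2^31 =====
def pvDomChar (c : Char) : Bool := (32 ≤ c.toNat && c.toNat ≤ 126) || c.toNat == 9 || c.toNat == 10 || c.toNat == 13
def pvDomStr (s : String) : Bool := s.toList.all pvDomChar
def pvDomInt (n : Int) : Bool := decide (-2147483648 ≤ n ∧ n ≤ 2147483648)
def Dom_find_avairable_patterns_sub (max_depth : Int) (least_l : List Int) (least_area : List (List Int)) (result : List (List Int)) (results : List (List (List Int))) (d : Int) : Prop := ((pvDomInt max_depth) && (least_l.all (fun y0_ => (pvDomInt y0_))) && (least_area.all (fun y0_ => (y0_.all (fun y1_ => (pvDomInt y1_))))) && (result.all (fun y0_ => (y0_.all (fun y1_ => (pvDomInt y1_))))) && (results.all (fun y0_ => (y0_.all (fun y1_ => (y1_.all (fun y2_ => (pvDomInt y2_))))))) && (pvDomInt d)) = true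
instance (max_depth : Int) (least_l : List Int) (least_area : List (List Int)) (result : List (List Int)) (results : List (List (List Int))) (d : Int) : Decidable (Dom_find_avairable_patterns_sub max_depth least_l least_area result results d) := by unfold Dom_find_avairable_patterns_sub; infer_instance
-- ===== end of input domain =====

-- B replaces A's depth-first recursion by a level-synchronous worklist expansion (same cost);
-- equivalence is about the RETURN value (both Pythons append to `results` in place, A additionally
-- mutates `result` in its base case).


-- ===== PORT A =====
-- Literal port of A's recursion.  The recursion over the Int depth is driven by
-- fuel = (max_depth - d).toNat and the `for i in range(len(least_l)+1)` loop with its break by the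
-- countdown j = len(least_l)+1-i; both only make the termination structural, the computation is
-- A's step for step (the `| 0 => results` fuel arm under `d < max_depth` is dead: fuel is positive
-- there).  Python's least_area[0] is ported as `headD []`: Pre_ excludes exactly the inputs where
-- Python raises IndexError, so the default is never reached on admitted inputs.
-- `results` is threaded through the recursive call (the Python recursion mutates it in place and
-- returns it).
def fapsA_loop (go_f : List Int → List (List Int) → List (List Int) → List (List (List Int)) → Int → List (List (List Int))) (max_depth : Int) (least_l : List Int) (least_area : List (List Int)) (result : List (List Int)) (d : Int) : Nat → Nat → List (List (List Int)) → List (List (List Int))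
  | 0, _, results => results
  | j + 1, i, results =>
    if i ≤ least_l.length then
      let tmp_res := result ++ [least_l.take i]
      if ((least_area.headD []).length : Int) < (least_l.take i).sum + ((least_l.take i).length : Int) - 1 then
        results
      else
        fapsA_loop go_f max_depth least_l least_area result d j (i + 1)
          (go_f (least_l.drop i) least_area.tail tmp_res results (d + 1))
    else results

def fapsA_go (fuel : Nat) (max_depth : Int) (least_l : List Int) (least_area : List (List Int)) (result : List (List Int)) (results : List (List (List Int))) (d : Int) : List (List (List Int)) :=
  match fuel with
  | 0 =>
    if max_depth ≤ d then
      if ((least_area.headD []).length : Int) < least_l.sum + (least_l.length : Int) - 1 then results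
      else results ++ [result ++ [least_l]]
    else results
  | f + 1 =>
    if max_depth ≤ d then
      if ((least_area.headD []).length : Int) < least_l.sum + (least_l.length : Int) - 1 then results
      else results ++ [result ++ [least_l]]
    else
      fapsA_loop (fun l' a' r' rs' d' => fapsA_go f max_depth l' a' r' rs' d') max_depth least_l least_area result d
        (least_l.length + 1) 0 results

def find_avairable_patterns_sub (max_depth : Int) (least_l : List Int) (least_area : List (List Int)) (result : List (List Int)) (results : List (List (List Int))) (d : Int) : List (List (List Int)) :=
  fapsA_go (max_depth - d).toNat max_depth least_l least_area result results d

-- ===== PORT B =====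
-- the inner `for i in range(len(ls)+1)` with its break (countdown j, index i): the child states
-- of one partial partition
def fapsB_children (areaLen : Int) (ls : List Int) (res : List (List Int)) : Nat → Nat → List (List Int × List (List Int))
  | 0, _ => []
  | j + 1, i =>
    if i ≤ ls.length then
      let chunk := ls.take i
      if areaLen < chunk.sum + (chunk.length : Int) - 1 then []
      else (ls.drop i, res ++ [chunk]) :: fapsB_children areaLen ls res j (i + 1)
    else []

-- the `for _ in range(levels)` loop: expands all states one level, consuming one area row per level
def fapsB_levels (levels : Nat) (area : List (List Int)) (states : List (List Int × List (List Int))) : List (List Int × List (List Int)) × List (List Int) :=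
  match levels with
  | 0 => (states, area)
  | k + 1 =>
      fapsB_levels k area.tail
        (states.flatMap fun s => fapsB_children ((area.headD []).length : Int) s.1 s.2 (s.1.length + 1) 0)

def find_avairable_patterns_sub_alt (max_depth : Int) (least_l : List Int) (least_area : List (List Int)) (result : List (List Int)) (results : List (List (List Int))) (d : Int) : List (List (List Int)) :=
  let levels := (max_depth - d).toNat
  let p := fapsB_levels levels least_area [(least_l, result)]
  let finalLen : Int := ((p.2.headD []).length : Int)
  results ++ p.1.filterMap (fun s =>
    if finalLen ≥ s.1.sum + (s.1.length : Int) - 1 then some (s.2 ++ [s.1]) else none)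

-- ===== PRECONDITION & SPEC =====
-- Pre_ excludes exactly the inputs on which Python A raises IndexError (least_area runs out of
-- rows before the recursion reaches max_depth: both programs index least_area once per level).
def Pre_find_avairable_patterns_sub (max_depth : Int) (least_l : List Int) (least_area : List (List Int)) (result : List (List Int)) (results : List (List (List Int))) (d : Int) : Prop :=
  least_area ≠ [] ∧ max_depth - d + 1 ≤ (least_area.length : Int)
instance (max_depth : Int) (least_l : List Int) (least_area : List (List Int)) (result : List (List Int)) (results : List (List (List Int))) (d : Int) : Decidable (Pre_find_avairable_patterns_sub max_depth least_l least_area result results d) := by unfold Pre_find_avairable_patterns_sub; infer_instance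

def pvWitness_find_avairable_patterns_sub : Int × List Int × List (List Int) × List (List Int) × List (List (List Int)) × Int :=
  (2, [1], [[3, 0], [1]], [], [], 1)

def Spec_find_avairable_patterns_sub (max_depth : Int) (least_l : List Int) (least_area : List (List Int)) (result : List (List Int)) (results : List (List (List Int))) (d : Int) (out : List (List (List Int))) : Prop := out = find_avairable_patterns_sub_alt max_depth least_l least_area result results d
instance (max_depth : Int) (least_l : List Int) (least_area : List (List Int)) (result : List (List Int)) (results : List (List (List Int))) (d : Int) (out : List (List (List Int))) : Decidable (Spec_find_avairable_patterns_sub max_depth least_l least_area result results d out) := by unfold Spec_find_avairable_patterns_sub; infer_instance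

-- ===== CLAIM (what is proved, stated in full; the proofs are below) =====
def Claim_equal_find_avairable_patterns_sub : Prop := ∀ (max_depth : Int) (least_l : List Int) (least_area : List (List Int)) (result : List (List Int)) (results : List (List (List Int))) (d : Int), Dom_find_avairable_patterns_sub max_depth least_l least_area result results d → Pre_find_avairable_patterns_sub max_depth least_l least_area result results d → Spec_find_avairable_patterns_sub max_depth least_l least_area result results d (find_avairable_patterns_sub max_depth least_l least_area result results d)

-- ===== LEMMAS AND PROOFS =====

-- B's value after the level loop plus the final filter, as a function of the state list
def Bcore (k : Nat) (area : List (List Int)) (states : List (List Int × List (List Int))) : List (List (List Int)) :=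
  ((fapsB_levels k area states).1).filterMap (fun s =>
    if ((((fapsB_levels k area states).2).headD []).length : Int) ≥ s.1.sum + (s.1.length : Int) - 1
    then some (s.2 ++ [s.1]) else none)

theorem fapsB_levels_snd_congr (k : Nat) (area : List (List Int)) (s t : List (List Int × List (List Int))) :
    (fapsB_levels k area s).2 = (fapsB_levels k area t).2 := by
  induction k generalizing area s t with
  | zero => simp [fapsB_levels]
  | succ k ih => simpa [fapsB_levels] using ih _ _ _

theorem fapsB_levels_fst_append (k : Nat) (area : List (List Int)) (s t : List (List Int × List (List Int))) :
    (fapsB_levels k area (s ++ t)).1 = (fapsB_levels k area s).1 ++ (fapsB_levels k area t).1 := by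
  induction k generalizing area s t with
  | zero => simp [fapsB_levels]
  | succ k ih => simp [fapsB_levels, ih]

theorem Bcore_append (k : Nat) (area : List (List Int)) (s t : List (List Int × List (List Int))) :
    Bcore k area (s ++ t) = Bcore k area s ++ Bcore k area t := by
  unfold Bcore
  rw [fapsB_levels_fst_append, List.filterMap_append,
      fapsB_levels_snd_congr k area (s ++ t) s, fapsB_levels_snd_congr k area t s]

theorem fapsB_levels_fst_nil (k : Nat) (area : List (List Int)) :
    (fapsB_levels k area ([] : List (List Int × List (List Int)))).1 = [] := by
  induction k generalizing area with
  | zero => simp [fapsB_levels]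
  | succ k ih => simp [fapsB_levels, ih]

theorem Bcore_nil (k : Nat) (area : List (List Int)) : Bcore k area [] = [] := by
  unfold Bcore
  rw [fapsB_levels_fst_nil, List.filterMap_nil]

theorem go_eq (fuel : Nat) :
    ∀ (max_depth : Int) (least_l : List Int) (least_area : List (List Int))
      (result : List (List Int)) (results : List (List (List Int))) (d : Int),
      fuel = (max_depth - d).toNat →
      fapsA_go fuel max_depth least_l least_area result results d
        = results ++ Bcore fuel least_area [(least_l, result)] := by
  induction fuel with
  | zero =>
    intro md l area res results d hf
    have hle : md ≤ d := by omega
    rw [fapsA_go]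
    rw [if_pos hle]
    unfold Bcore
    rw [show fapsB_levels 0 area [(l, res)] = ([(l, res)], area) from rfl]
    simp only [List.filterMap_cons, List.filterMap_nil]
    split_ifs with h1 h2 h2 <;> simp_all <;> omega
  | succ f ih =>
    intro md l area res results d hf
    have hlt : ¬ md ≤ d := by omega
    have hchild : ∀ (l' : List Int) (res' : List (List Int)) (results' : List (List (List Int))),
        fapsA_go f md l' area.tail res' results' (d + 1)
          = results' ++ Bcore f area.tail [(l', res')] :=
      fun l' res' results' => ih md l' area.tail res' results' (d + 1) (by omega)
    -- the loop from countdown j / index i equals the Bcore of the child frames from there on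
    have hloop : ∀ (j i : Nat) (results' : List (List (List Int))),
        fapsA_loop (fun l' a' r' rs' d' => fapsA_go f md l' a' r' rs' d') md l area res d j i results'
          = results' ++ Bcore f area.tail (fapsB_children (((area.headD []).length : Int)) l res j i) := by
      intro j
      induction j with
      | zero =>
        intro i results'
        rw [fapsA_loop, fapsB_children, Bcore_nil, List.append_nil]
      | succ j ihj =>
        intro i results'
        rw [fapsA_loop, fapsB_children]
        by_cases hle2 : i ≤ l.length
        · simp only [if_pos hle2]
          split_ifs with hc
          · rw [Bcore_nil, List.append_nil]
          · rw [ihj (i + 1), hchild,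
                show ((l.drop i, res ++ [l.take i]) :: fapsB_children (((area.headD []).length : Int)) l res j (i + 1))
                  = [(l.drop i, res ++ [l.take i])] ++ fapsB_children (((area.headD []).length : Int)) l res j (i + 1) from rfl,
                Bcore_append, List.append_assoc]
        · simp only [if_neg hle2]
          rw [Bcore_nil, List.append_nil]
    rw [fapsA_go]
    simp only [if_neg hlt]
    rw [hloop (l.length + 1) 0 results]
    congr 1
    unfold Bcore
    simp [fapsB_levels]

-- ===== VERDICT (by name: the statement is the Claim_ definition above) =====
theorem find_avairable_patterns_sub_spec : Claim_equal_find_avairable_patterns_sub := by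
  intro md l area res results d _ _
  unfold Spec_find_avairable_patterns_sub find_avairable_patterns_sub find_avairable_patterns_sub_alt
  rw [go_eq (md - d).toNat md l area res results d rfl]
  rfl
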